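-- pv_equiv track=rewrite | github.com/daniel-reich/ubiquitous-fiesta | 4xZFisQX8NnYB3nv4_6.py | maximum_seating
-- ===== SOURCE A (Python) =====
-- def maximum_seating(lst):
--   s=sum(lst)
--   i=0
--   while i<len(lst):
--     if i<2:
--       A=lst[:i+3]
--     elif 2<=i<len(lst)-2:
--       A=lst[i-2:i+3]
--     else:
--       A=lst[i-2:]
--     if all(x==0 for x in A):
--       lst[i]=1
--     i+=1
--   return sum(lst)-s
-- ===== SOURCE B (Python) =====
-- def maximum_seating(lst):
--     n = len(lst)
--     count = 0
--     gap = 2  # number of known-clear cells immediately to the left (saturating view via >= 2)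
--     for i in range(n):
--         if lst[i] != 0:
--             gap = 0
--         elif gap >= 2 and (i + 1 >= n or lst[i + 1] == 0) and (i + 2 >= n or lst[i + 2] == 0):
--             count += 1
--             gap = 0
--         else:
--             gap += 1
--     return count
-- ===== Notes on version B (the rewrite author's own statement) =====
-- stated objective: faster
-- what changed: Replaces A's per-index window slicing (three slice branches plus all()) and in-place mutation with a single non-mutating pass that maintains a clear-gap counter and checks the two lookahead cells directly, counting placements instead of diffing sums.
import Mathlib
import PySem

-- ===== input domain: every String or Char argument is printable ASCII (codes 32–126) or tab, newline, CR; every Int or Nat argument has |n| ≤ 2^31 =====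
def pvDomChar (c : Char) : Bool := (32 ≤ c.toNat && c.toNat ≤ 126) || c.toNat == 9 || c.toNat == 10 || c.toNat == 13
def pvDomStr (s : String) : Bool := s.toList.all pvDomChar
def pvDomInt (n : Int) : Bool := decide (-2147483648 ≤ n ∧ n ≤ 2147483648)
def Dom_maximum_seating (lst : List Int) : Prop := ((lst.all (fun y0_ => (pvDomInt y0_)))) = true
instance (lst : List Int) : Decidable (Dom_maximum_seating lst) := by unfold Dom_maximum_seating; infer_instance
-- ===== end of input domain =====

-- B replaces A's per-index window slicing with one pass maintaining a clear-gap counter and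
-- no mutation (measured faster by a constant factor); A mutates its argument in place, B does
-- not — the equivalence proved here is about the RETURN value only.

-- ===== PORT A =====
-- (used by pvLoopA's termination proof)
theorem pvIteSetLen (c : Prop) [Decidable c] (l : List Int) (i : Nat) (a : Int) :
    (if c then l.set i a else l).length = l.length := by
  split <;> simp

-- the while-loop of A: `cur` is the (mutated) list, `i` the loop index
def pvLoopA (cur : List Int) (i : Nat) : List Int :=
  if h : i < cur.length then
    let A :=
      if (i : Int) < 2 then
        PySem.List.slice cur none (some ((i : Int) + 3))
      else if 2 ≤ (i : Int) ∧ (i : Int) < (cur.length : Int) - 2 then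
        PySem.List.slice cur (some ((i : Int) - 2)) (some ((i : Int) + 3))
      else
        PySem.List.slice cur (some ((i : Int) - 2)) none
    let cur' := if A.all (fun x => x == 0) then cur.set i 1 else cur
    pvLoopA cur' (i + 1)
  else cur
termination_by cur.length - i
decreasing_by
  simp [pvIteSetLen]
  omega

def maximum_seating (lst : List Int) : Int :=
  let s := lst.sum
  (pvLoopA lst 0).sum - s

-- ===== PORT B =====
-- Source B's for-loop: `gap` counts known-clear cells immediately left of i; `lst[i]` is read
-- as `lst.getD i 0` (the loop guard keeps i in range, so this equals Python's lst[i])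
def pvLoopB (lst : List Int) (n : Nat) (i : Nat) (count : Int) (gap : Nat) : Int :=
  if i < n then
    if lst.getD i 0 ≠ 0 then
      pvLoopB lst n (i + 1) count 0
    else if 2 ≤ gap ∧ (n ≤ i + 1 ∨ lst.getD (i + 1) 0 = 0) ∧ (n ≤ i + 2 ∨ lst.getD (i + 2) 0 = 0) then
      pvLoopB lst n (i + 1) (count + 1) 0
    else
      pvLoopB lst n (i + 1) count (gap + 1)
  else count
termination_by n - i

def maximum_seating_alt (lst : List Int) : Int :=
  pvLoopB lst lst.length 0 0 2

-- ===== PRECONDITION & SPEC =====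
def Spec_maximum_seating (lst : List Int) (out : Int) : Prop := out = maximum_seating_alt lst
instance (lst : List Int) (out : Int) : Decidable (Spec_maximum_seating lst out) := by unfold Spec_maximum_seating; infer_instance

-- ===== CLAIM (what is proved, stated in full; the proofs are below) =====
def Claim_equal_maximum_seating : Prop := ∀ (lst : List Int), Dom_maximum_seating lst → Spec_maximum_seating lst (maximum_seating lst)

-- ===== LEMMAS AND PROOFS =====

-- count-accumulator additivity of B's loop
theorem pvLoopB_add (lst : List Int) (n : Nat) : ∀ (k i : Nat) (c : Int) (g : Nat),
    n - i = k → pvLoopB lst n i c g = c + pvLoopB lst n i 0 g := by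
  intro k
  induction k with
  | zero =>
    intro i c g hk
    rw [pvLoopB.eq_def lst n i c g, pvLoopB.eq_def lst n i 0 g]
    rw [if_neg (by omega : ¬ i < n), if_neg (by omega : ¬ i < n)]
    simp
  | succ k ih =>
    intro i c g hk
    by_cases hi : i < n
    · rw [pvLoopB.eq_def lst n i c g, pvLoopB.eq_def lst n i 0 g]
      rw [if_pos hi, if_pos hi]
      split
      · rw [ih (i+1) c 0 (by omega), ih (i+1) 0 0 (by omega)]
      · split
        · rw [ih (i+1) (c+1) 0 (by omega), ih (i+1) (0+1) 0 (by omega)]; ring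
        · rw [ih (i+1) c (g+1) (by omega), ih (i+1) 0 (g+1) (by omega)]
    · rw [pvLoopB.eq_def lst n i c g, pvLoopB.eq_def lst n i 0 g]
      rw [if_neg hi, if_neg hi]
      simp

-- all-zero over a drop/take window, in terms of getD
theorem pvAllZero_drop_take (cur : List Int) (a b : Nat) :
    (((cur.drop a).take b).all (fun x => x == 0)) = true ↔
      (∀ j : Nat, a ≤ j → j < a + b → j < cur.length → cur.getD j 0 = 0) := by
  rw [List.all_eq_true]
  constructor
  · intro h j hja hjb hjl
    have hj' : j - a < ((cur.drop a).take b).length := by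
      simp [List.length_take, List.length_drop]; omega
    have hmem : ((cur.drop a).take b)[j - a] ∈ (cur.drop a).take b := List.getElem_mem hj'
    have := h _ hmem
    have hget : ((cur.drop a).take b)[j - a] = cur[j]'hjl := by
      rw [List.getElem_take, List.getElem_drop]
      congr 1
      omega
    rw [List.getD_eq_getElem cur 0 hjl]
    rw [hget] at this
    simpa using this
  · intro h x hx
    rw [List.mem_iff_getElem] at hx
    obtain ⟨j, hj, hxj⟩ := hx
    have hjl : a + j < cur.length := by
      simp [List.length_take, List.length_drop] at hj
      omega
    have hget : ((cur.drop a).take b)[j]'hj = cur[a + j]'hjl := by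
      rw [List.getElem_take, List.getElem_drop]
    have := h (a + j) (by omega) (by simp [List.length_take, List.length_drop] at hj; omega) hjl
    rw [List.getD_eq_getElem cur 0 hjl] at this
    simp [← hxj, hget, this]

-- A's window test at index i is exactly: all cells within distance 2 of i are zero
theorem pvWindow_iff (cur : List Int) (i : Nat) (hi : i < cur.length) :
    ((if (i : Int) < 2 then
        PySem.List.slice cur none (some ((i : Int) + 3))
      else if 2 ≤ (i : Int) ∧ (i : Int) < (cur.length : Int) - 2 then
        PySem.List.slice cur (some ((i : Int) - 2)) (some ((i : Int) + 3))
      else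
        PySem.List.slice cur (some ((i : Int) - 2)) none).all (fun x => x == 0)) = true ↔
      (∀ j : Nat, i - 2 ≤ j → j < i + 3 → j < cur.length → cur.getD j 0 = 0) := by
  split
  · -- i < 2
    rename_i h2
    have h2' : i < 2 := by exact_mod_cast h2
    have : ((i : Int) + 3) = ((i + 3 : Nat) : Int) := by push_cast; ring
    rw [this, PySem.List.slice_to_natCast]
    have := pvAllZero_drop_take cur 0 (i + 3)
    simp only [List.drop_zero] at this
    rw [this]
    constructor
    · intro h j hja hjb hjl; exact h j (by omega) (by omega) hjl
    · intro h j hja hjb hjl; exact h j (by omega) (by omega) hjl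
  · split
    · -- 2 ≤ i < len - 2
      rename_i h2 hm
      have h2' : 2 ≤ i := by exact_mod_cast hm.1
      have e1 : ((i : Int) - 2) = ((i - 2 : Nat) : Int) := by push_cast [h2']; ring
      have e2 : ((i : Int) + 3) = ((i + 3 : Nat) : Int) := by push_cast; ring
      rw [e1, e2, PySem.List.slice_natCast]
      rw [pvAllZero_drop_take]
      constructor
      · intro h j hja hjb hjl; exact h j (by omega) (by omega) hjl
      · intro h j hja hjb hjl; exact h j (by omega) (by omega) hjl
    · -- else: 2 ≤ i and i ≥ len - 2
      rename_i h2 hm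
      have h2' : 2 ≤ i := by
        have : ¬ ((i : Int) < 2) := h2
        omega
      have hlen : cur.length ≤ i + 2 := by
        rcases not_and_or.mp hm with h | h
        · exact absurd (by exact_mod_cast h2' : (2:Int) ≤ (i:Int)) h
        · have : (cur.length : Int) - 2 ≤ (i : Int) := by omega
          omega
      have e1 : ((i : Int) - 2) = ((i - 2 : Nat) : Int) := by push_cast [h2']; ring
      rw [e1, PySem.List.slice_from_natCast]
      have e2 : cur.drop (i - 2) = (cur.drop (i - 2)).take cur.length := by
        rw [List.take_of_length_le]
        simp
      rw [e2, pvAllZero_drop_take]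
      constructor
      · intro h j hja hjb hjl; exact h j (by omega) (by omega) hjl
      · intro h j hja hjb hjl; exact h j (by omega) (by omega) hjl

-- sum after a single in-range set, in difference form
theorem pvSum_set (l : List Int) : ∀ (i : Nat) (a : Int), i < l.length →
    (l.set i a).sum = l.sum + a - l.getD i 0 := by
  induction l with
  | nil => intro i a h; simp at h
  | cons x xs ih =>
    intro i a h
    cases i with
    | zero => simp [List.set]; ring
    | succ i =>
      simp only [List.set, List.sum_cons, List.getD_cons_succ]
      rw [ih i a (by simpa using h)]
      ring

-- getD of set at another index
theorem pvGetD_set_ne (l : List Int) (i j : Nat) (a : Int) (hne : i ≠ j) :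
    (l.set i a).getD j 0 = l.getD j 0 := by
  simp [List.getD, List.getElem?_set_ne hne]

theorem pvGetD_set_self (l : List Int) (i : Nat) (a : Int) (h : i < l.length) :
    (l.set i a).getD i 0 = a := by
  simp [List.getD, h]

-- MAIN INVARIANT: running A's loop from state (cur, i) adds exactly what B's loop
-- counts from (i, gap), provided cur agrees with lst from i on, the `gap` cells
-- before i are clear in cur, and gap < 2 implies the cell just before them is occupied.
theorem pvMain (lst : List Int) : ∀ (k : Nat) (cur : List Int) (i gap : Nat),
    lst.length - i = k →
    cur.length = lst.length →
    (∀ j : Nat, i ≤ j → cur.getD j 0 = lst.getD j 0) →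
    (∀ j : Nat, i - gap ≤ j → j < i → cur.getD j 0 = 0) →
    (2 ≤ gap ∨ (gap < i ∧ cur.getD (i - gap - 1) 0 ≠ 0)) →
    (pvLoopA cur i).sum = cur.sum + pvLoopB lst lst.length i 0 gap := by
  intro k
  induction k with
  | zero =>
    intro cur i gap hk hlen _ _ _
    rw [pvLoopA.eq_def cur i, pvLoopB.eq_def lst lst.length i 0 gap]
    rw [dif_neg (by omega), if_neg (by omega)]
    simp
  | succ k ih =>
    intro cur i gap hk hlen h2 h3 h4
    have hi : i < cur.length := by omega
    have hival : cur.getD i 0 = lst.getD i 0 := h2 i le_rfl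
    have hwin := pvWindow_iff cur i hi
    rw [pvLoopA.eq_def cur i, dif_pos hi]
    simp only []
    rw [pvLoopB.eq_def lst lst.length i 0 gap, if_pos (by omega : i < lst.length)]
    by_cases hz : lst.getD i 0 = 0
    · rw [if_neg (c := lst.getD i 0 ≠ 0) (not_not_intro hz)]
      by_cases hb : 2 ≤ gap ∧ (lst.length ≤ i + 1 ∨ lst.getD (i + 1) 0 = 0) ∧
          (lst.length ≤ i + 2 ∨ lst.getD (i + 2) 0 = 0)
      · -- B places; show A's window is all zero, A sets cur[i] := 1
        obtain ⟨hg, hr1, hr2⟩ := hb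
        have hwz : ∀ j : Nat, i - 2 ≤ j → j < i + 3 → j < cur.length → cur.getD j 0 = 0 := by
          intro j hja hjb hjl
          rcases lt_trichotomy j i with hlt | heq | hgt
          · exact h3 j (by omega) hlt
          · subst heq; rw [hival]; exact hz
          · have hj1 : j = i + 1 ∨ j = i + 2 := by omega
            rcases hj1 with rfl | rfl
            · rw [h2 _ (by omega)]
              rcases hr1 with h | h
              · omega
              · exact h
            · rw [h2 _ (by omega)]
              rcases hr2 with h | h
              · omega
              · exact h
        rw [if_pos (hwin.mpr hwz), if_pos ⟨hg, hr1, hr2⟩]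
        have hset : ∀ j : Nat, i + 1 ≤ j → (cur.set i 1).getD j 0 = lst.getD j 0 := by
          intro j hj
          rw [pvGetD_set_ne cur i j 1 (by omega)]
          exact h2 j (by omega)
        rw [ih (cur.set i 1) (i + 1) 0 (by omega) (by simpa using hlen) hset
            (by intro j hja hjb; omega)
            (by
              right
              refine ⟨by omega, ?_⟩
              simp only [Nat.add_sub_cancel, Nat.sub_zero]
              rw [pvGetD_set_self cur i 1 hi]
              norm_num)]
        rw [pvSum_set cur i 1 hi, hival, hz]
        rw [pvLoopB_add lst lst.length (lst.length - (i+1)) (i+1) (0+1) 0 rfl]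
        ring
      · -- B blocked; show A's window is NOT all zero
        have hwnz : ¬ (∀ j : Nat, i - 2 ≤ j → j < i + 3 → j < cur.length → cur.getD j 0 = 0) := by
          intro hall
          apply hb
          refine ⟨?_, ?_, ?_⟩
          · by_contra hg
            rcases h4 with h | ⟨hgi, hnz⟩
            · omega
            · exact hnz (hall (i - gap - 1) (by omega) (by omega) (by omega))
          · by_cases hn : lst.length ≤ i + 1
            · exact Or.inl hn
            · right
              rw [← h2 (i+1) (by omega)]
              exact hall (i+1) (by omega) (by omega) (by omega)
          · by_cases hn : lst.length ≤ i + 2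
            · exact Or.inl hn
            · right
              rw [← h2 (i+2) (by omega)]
              exact hall (i+2) (by omega) (by omega) (by omega)
        rw [if_neg (fun h => hwnz (hwin.mp h)), if_neg hb]
        apply ih cur (i + 1) (gap + 1) (by omega) hlen
          (fun j hj => h2 j (by omega))
        · intro j hja hjb
          rcases lt_or_ge j i with hlt | hge
          · exact h3 j (by omega) hlt
          · have : j = i := by omega
            subst this
            rw [hival]; exact hz
        · rcases h4 with h | ⟨hgi, hnz⟩
          · left; omega
          · by_cases hg2 : 2 ≤ gap + 1
            · exact Or.inl hg2
            · right
              have hg0 : gap = 0 := by omega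
              subst hg0
              refine ⟨by omega, ?_⟩
              simpa using hnz
    · -- current cell occupied: window contains a nonzero cell at i
      rw [if_pos (c := lst.getD i 0 ≠ 0) hz]
      have hwnz : ¬ (∀ j : Nat, i - 2 ≤ j → j < i + 3 → j < cur.length → cur.getD j 0 = 0) := by
        intro hall
        exact hz (hival ▸ hall i (by omega) (by omega) hi)
      rw [if_neg (fun h => hwnz (hwin.mp h))]
      apply ih cur (i + 1) 0 (by omega) hlen (fun j hj => h2 j (by omega))
        (by intro j hja hjb; omega)
      right
      refine ⟨by omega, ?_⟩
      simp only [Nat.add_sub_cancel, Nat.sub_zero]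
      rw [hival]
      exact hz

-- ===== VERDICT (by name: the statement is the Claim_ definition above) =====
theorem maximum_seating_spec : Claim_equal_maximum_seating := by
  intro lst _
  unfold Spec_maximum_seating maximum_seating maximum_seating_alt
  have := pvMain lst lst.length lst 0 2 (by omega) rfl (fun j _ => rfl)
    (by intro j hja hjb; omega) (Or.inl le_rfl)
  simp only []
  rw [this]
  ring
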